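-- pv_equiv track=rewrite | github.com/NicolasRodriguezUribe/VAMOS | src/vamos/core/optimize.py | _infer_algorithm_name
-- ===== SOURCE A (Python) =====
-- from typing import Any, Mapping, Tuple
--
-- def _infer_algorithm_name(cfg_dict: Mapping[str, Any]) -> str:
--     """
--     Legacy heuristic to infer algorithm name when not provided.
--     Kept for backward compatibility; emits deprecation warnings upstream.
--     """
--     if "survival" in cfg_dict or cfg_dict.get("algorithm", "").lower() == "nsgaii":
--         return "nsgaii"
--     if "neighbor_size" in cfg_dict or "aggregation" in cfg_dict:
--         return "moead"
--     if "reference_point" in cfg_dict and "selection" in cfg_dict: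
--         return "smsemoa"
--     if "reference_directions" in cfg_dict:
--         return "nsga3"
--     if "archive_size" in cfg_dict and "k_neighbors" in cfg_dict:
--         return "spea2"
--     if "indicator" in cfg_dict:
--         return "ibea"
--     if any(k in cfg_dict for k in ("inertia", "c1", "c2", "vmax_fraction")):
--         return "smpso"
--     return ""
-- ===== SOURCE B (Python) =====
-- # Inverted-index reimplementation: instead of testing each rule's keys against the
-- # config, scan the config's keys once through a key->rule map, tally per-rule hits,
-- # then return the first rule (in priority order) whose hit count meets its threshold.
--
-- _KEY_RULE = {
--     "survival": 0,
--     "neighbor_size": 1, "aggregation": 1,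
--     "reference_point": 2, "selection": 2,
--     "reference_directions": 3,
--     "archive_size": 4, "k_neighbors": 4,
--     "indicator": 5,
--     "inertia": 6, "c1": 6, "c2": 6, "vmax_fraction": 6,
-- }
-- _NAMES = ["nsgaii", "moead", "smsemoa", "nsga3", "spea2", "ibea", "smpso"]
-- _NEED = [1, 1, 2, 1, 2, 1, 1]
--
--
-- def _infer_algorithm_name(cfg_dict):
--     counts = [0] * 7
--     for k in cfg_dict:
--         r = _KEY_RULE.get(k)
--         if r is not None:
--             counts[r] += 1
--     if counts[0] or cfg_dict.get("algorithm", "").lower() == "nsgaii":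
--         return "nsgaii"
--     for i in range(1, 7):
--         if counts[i] >= _NEED[i]:
--             return _NAMES[i]
--     return ""
-- ===== Notes on version B (the rewrite author's own statement) =====
-- stated objective: alternative
-- what changed: Replaces the if-chain of per-rule membership tests against the config with an inverted index: one pass over the config's keys tallies hits per rule through a key-to-rule map, then the first rule whose hit count meets its threshold (2 for the two-key AND rules, 1 otherwise) is returned.
import Mathlib
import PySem

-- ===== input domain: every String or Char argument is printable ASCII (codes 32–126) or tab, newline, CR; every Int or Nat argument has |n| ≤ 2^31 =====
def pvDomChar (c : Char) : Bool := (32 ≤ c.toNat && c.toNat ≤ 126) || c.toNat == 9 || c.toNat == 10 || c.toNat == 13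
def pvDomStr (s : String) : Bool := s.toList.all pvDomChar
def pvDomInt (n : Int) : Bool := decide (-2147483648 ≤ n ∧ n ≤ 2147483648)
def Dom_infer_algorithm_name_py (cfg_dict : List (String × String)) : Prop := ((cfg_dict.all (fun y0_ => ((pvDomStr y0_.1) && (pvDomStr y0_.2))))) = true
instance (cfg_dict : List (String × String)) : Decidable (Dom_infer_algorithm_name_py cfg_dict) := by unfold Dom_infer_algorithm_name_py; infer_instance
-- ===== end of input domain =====

-- B replaces A's if-chain of per-rule membership tests by an inverted key->rule index:
-- one tallying pass over the config's keys, then a threshold scan over the seven rules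
-- (objective: alternative; same return value).

-- ===== PORT A =====
-- 'k in cfg_dict' is a dict key-membership test


def pvIn (cfg_dict : List (String × String)) (k : String) : Bool :=
  (PySem.Dict.mk cfg_dict).contains k

def infer_algorithm_name_py (cfg_dict : List (String × String)) : String :=
  if pvIn cfg_dict "survival"
      || PySem.Str.lower (PySem.Dict.getD ⟨cfg_dict⟩ "algorithm" "") == "nsgaii" then "nsgaii"
  else if pvIn cfg_dict "neighbor_size" || pvIn cfg_dict "aggregation" then "moead"
  else if pvIn cfg_dict "reference_point" && pvIn cfg_dict "selection" then "smsemoa"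
  else if pvIn cfg_dict "reference_directions" then "nsga3"
  else if pvIn cfg_dict "archive_size" && pvIn cfg_dict "k_neighbors" then "spea2"
  else if pvIn cfg_dict "indicator" then "ibea"
  else if (["inertia", "c1", "c2", "vmax_fraction"].any fun k => pvIn cfg_dict k) then "smpso"
  else ""

-- the tallying loop of Source B: counts = [0]*7; for k in cfg_dict: ...

-- ===== PORT B =====
-- the _KEY_RULE inverted index, _NAMES and _NEED tables of Source B
def pvKeyRule : PySem.Dict String Nat :=
  ⟨[("survival", 0),("neighbor_size", 1), ("aggregation", 1),("reference_point", 2), ("selection", 2),("reference_directions", 3),("archive_size", 4), ("k_neighbors", 4),("indicator", 5),("inertia", 6), ("c1", 6), ("c2", 6), ("vmax_fraction", 6)]⟩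

def pvNames : List String := ["nsgaii", "moead", "smsemoa", "nsga3", "spea2", "ibea", "smpso"]

def pvNeed : List Int := [1, 1, 2, 1, 2, 1, 1]

-- loop body of Source B: 'r = _KEY_RULE.get(k)'; 'if r is not None: counts[r] += 1'
def pvTally (counts : List Int) (k : String) : List Int :=
  match pvKeyRule.get? k with
  | some r => counts.set r (counts.getD r 0 + 1)
  | none => counts

def pvCounts (cfg_dict : List (String × String)) : List Int :=
  (PySem.List.dedup (cfg_dict.map Prod.fst)).foldl pvTally (List.replicate 7 (0 : Int))

def infer_algorithm_name_py_alt (cfg_dict : List (String × String)) : String :=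
  if (pvCounts cfg_dict).getD 0 0 != 0
      || PySem.Str.lower (PySem.Dict.getD ⟨cfg_dict⟩ "algorithm" "") == "nsgaii" then "nsgaii"
  else
    match (PySem.List.pyRange 1 7 1).findSome? (fun i =>
        if pvNeed.getD i.toNat 0 ≤ (pvCounts cfg_dict).getD i.toNat 0
        then some (pvNames.getD i.toNat "") else none) with
    | some n => n
    | none => ""

-- ===== PRECONDITION & SPEC =====
def Spec_infer_algorithm_name_py (cfg_dict : List (String × String)) (out : String) : Prop := out = infer_algorithm_name_py_alt cfg_dict
instance (cfg_dict : List (String × String)) (out : String) : Decidable (Spec_infer_algorithm_name_py cfg_dict out) := by unfold Spec_infer_algorithm_name_py; infer_instance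

-- ===== CLAIM =====
def Claim_equal_infer_algorithm_name_py : Prop := ∀ (cfg_dict : List (String × String)), Dom_infer_algorithm_name_py cfg_dict → Spec_infer_algorithm_name_py cfg_dict (infer_algorithm_name_py cfg_dict)

-- ===== LEMMAS AND PROOFS =====

theorem pvKeyRule_lt (k : String) (r : Nat) (h : pvKeyRule.get? k = some r) : r < 7 := by
  have hm := PySem.Dict.mem_items_of_get?_eq_some (d := pvKeyRule) h
  simp [pvKeyRule, Prod.ext_iff] at hm
  omega

theorem pvTally_getD (l : List String) (acc : List Int) (hlen : acc.length = 7)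
    (r : Nat) (hr : r < 7) :
    (l.foldl pvTally acc).getD r 0
      = acc.getD r 0 + (l.countP (fun k => pvKeyRule.get? k == some r) : Int) := by
  induction l generalizing acc with
  | nil => simp
  | cons k l ih =>
    simp only [List.foldl_cons, List.countP_cons]
    rcases h : pvKeyRule.get? k with _ | r0
    · rw [ih _ (by simp [pvTally, h, hlen])]
      simp [pvTally, h]
    · have hr0 : r0 < 7 := pvKeyRule_lt k r0 h
      rw [ih _ (by simp [pvTally, h, List.length_set, hlen])]
      simp only [pvTally, h, beq_iff_eq, Option.some.injEq]
      by_cases hrr : r = r0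
      · subst hrr
        rw [List.getD_eq_getElem?_getD, List.getElem?_set_self (by omega),
            Option.getD_some]
        simp [List.getD_eq_getElem?_getD]
        ring
      · rw [List.getD_eq_getElem?_getD, List.getElem?_set_ne (by omega)]
        simp only [List.getD_eq_getElem?_getD]
        have : (r0 = r) = False := by simp [Ne.symm hrr]
        simp [this]

theorem pvCountP_nodup_one (l : List String) (hl : l.Nodup) (a : String) :
    l.countP (fun k => k == a) = (if a ∈ l then 1 else 0) := by
  induction l with
  | nil => simp
  | cons x l ih =>
    simp only [List.countP_cons, List.nodup_cons] at *
    by_cases hx : x = a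
    · subst hx
      have hz : List.countP (fun k => k == x) l = 0 := by
        rw [List.countP_eq_zero]
        intro b hb; simp; rintro rfl; exact hl.1 hb
      simp [hl.1, hz]
    · simp [hx, ih hl.2, List.mem_cons, Ne.symm hx]

theorem pvCountP_nodup_or (l : List String) (hl : l.Nodup) (a b : String) (hab : a ≠ b) :
    l.countP (fun k => k == a || k == b)
      = (if a ∈ l then 1 else 0) + (if b ∈ l then 1 else 0) := by
  have : ∀ l' : List String, l'.countP (fun k => k == a || k == b)
      = l'.countP (fun k => k == a) + l'.countP (fun k => k == b) := by
    intro l'; induction l' with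
    | nil => simp
    | cons x t ih =>
      simp only [List.countP_cons, ih]
      by_cases hxa : x = a
      · subst hxa
        have : (x == b) = false := by simp [hab]
        simp [this]
        omega
      · by_cases hxb : x = b
        · subst hxb
          have : (x == a) = false := by simp [hxa]
          simp [this]
          omega
        · have h1 : (x == a) = false := by simp [hxa]
          have h2 : (x == b) = false := by simp [hxb]
          simp [h1, h2]
  rw [this, pvCountP_nodup_one l hl a, pvCountP_nodup_one l hl b]

theorem pv_mem_dedup (cfg : List (String × String)) (k : String) :
    (k ∈ PySem.List.dedup (cfg.map Prod.fst)) ↔ (PySem.Dict.mk cfg).contains k = true := by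
  rw [PySem.List.mem_dedup, PySem.Dict.contains_mk]
  simp [List.mem_map, List.any_eq_true, beq_iff_eq]

theorem pvPred0 (k : String) : (pvKeyRule.get? k == some 0) = (k == "survival") := by
  rw [Bool.eq_iff_iff]; simp only [beq_iff_eq]
  constructor
  · intro h
    have hm := PySem.Dict.mem_items_of_get?_eq_some (d := pvKeyRule) h
    simp [pvKeyRule, Prod.ext_iff] at hm
    tauto
  · rintro rfl; rfl

theorem pvPred1 (k : String) : (pvKeyRule.get? k == some 1) = (k == "neighbor_size" || k == "aggregation") := by
  rw [Bool.eq_iff_iff]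
  simp only [beq_iff_eq, Bool.or_eq_true]
  constructor
  · intro h
    have hm := PySem.Dict.mem_items_of_get?_eq_some (d := pvKeyRule) h
    simp [pvKeyRule, Prod.ext_iff] at hm
    tauto
  · intro h
    rcases h with rfl | rfl <;> rfl

theorem pvPred2 (k : String) : (pvKeyRule.get? k == some 2) = (k == "reference_point" || k == "selection") := by
  rw [Bool.eq_iff_iff]
  simp only [beq_iff_eq, Bool.or_eq_true]
  constructor
  · intro h
    have hm := PySem.Dict.mem_items_of_get?_eq_some (d := pvKeyRule) h
    simp [pvKeyRule, Prod.ext_iff] at hm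
    tauto
  · intro h
    rcases h with rfl | rfl <;> rfl

theorem pvPred3 (k : String) : (pvKeyRule.get? k == some 3) = (k == "reference_directions") := by
  rw [Bool.eq_iff_iff]
  simp only [beq_iff_eq]
  constructor
  · intro h
    have hm := PySem.Dict.mem_items_of_get?_eq_some (d := pvKeyRule) h
    simp [pvKeyRule, Prod.ext_iff] at hm
    tauto
  · intro h
    rcases h with rfl
    rfl

theorem pvPred4 (k : String) : (pvKeyRule.get? k == some 4) = (k == "archive_size" || k == "k_neighbors") := by
  rw [Bool.eq_iff_iff]
  simp only [beq_iff_eq, Bool.or_eq_true]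
  constructor
  · intro h
    have hm := PySem.Dict.mem_items_of_get?_eq_some (d := pvKeyRule) h
    simp [pvKeyRule, Prod.ext_iff] at hm
    tauto
  · intro h
    rcases h with rfl | rfl <;> rfl

theorem pvPred5 (k : String) : (pvKeyRule.get? k == some 5) = (k == "indicator") := by
  rw [Bool.eq_iff_iff]
  simp only [beq_iff_eq]
  constructor
  · intro h
    have hm := PySem.Dict.mem_items_of_get?_eq_some (d := pvKeyRule) h
    simp [pvKeyRule, Prod.ext_iff] at hm
    tauto
  · intro h
    rcases h with rfl
    rfl

theorem pvPred6 (k : String) : (pvKeyRule.get? k == some 6) = (k == "inertia" || k == "c1" || k == "c2" || k == "vmax_fraction") := by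
  rw [Bool.eq_iff_iff]
  simp only [beq_iff_eq, Bool.or_eq_true]
  constructor
  · intro h
    have hm := PySem.Dict.mem_items_of_get?_eq_some (d := pvKeyRule) h
    simp [pvKeyRule, Prod.ext_iff] at hm
    tauto
  · intro h
    rcases h with ((rfl | rfl) | rfl) | rfl <;> rfl

theorem pv_main (cfg : List (String × String)) :
    infer_algorithm_name_py cfg = infer_algorithm_name_py_alt cfg := by
  unfold infer_algorithm_name_py infer_algorithm_name_py_alt
  have hrange : PySem.List.pyRange 1 7 1 = [1, 2, 3, 4, 5, 6] := by decide
  rw [hrange]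
  have hnd : (PySem.List.dedup (cfg.map Prod.fst)).Nodup := PySem.List.nodup_dedup _
  have hc : ∀ r : Nat, r < 7 →
      (pvCounts cfg).getD r 0
        = ((PySem.List.dedup (cfg.map Prod.fst)).countP
            (fun k => pvKeyRule.get? k == some r) : Int) := by
    intro r hr
    unfold pvCounts
    rw [pvTally_getD _ _ (by simp) r hr]
    have : (List.replicate 7 (0 : Int)).getD r 0 = 0 := by interval_cases r <;> rfl
    rw [this]; ring
  simp only [List.findSome?_cons, List.findSome?_nil]
  norm_num [pvNeed, pvNames]
  simp only [show Int.toNat 2 = 2 from rfl, show Int.toNat 3 = 3 from rfl,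
    show Int.toNat 4 = 4 from rfl, show Int.toNat 5 = 5 from rfl, show Int.toNat 6 = 6 from rfl]
  norm_num
  simp only [List.getD_eq_getElem?_getD] at hc
  rw [hc 0 (by omega), hc 1 (by omega), hc 2 (by omega), hc 3 (by omega),
      hc 4 (by omega), hc 5 (by omega), hc 6 (by omega)]
  simp only [pvPred0, pvPred1, pvPred2, pvPred3, pvPred4, pvPred5, pvPred6]
  rw [pvCountP_nodup_or _ hnd "reference_point" "selection" (by decide),
      pvCountP_nodup_or _ hnd "archive_size" "k_neighbors" (by decide)]
  have h0 : ∀ n : Nat, (¬((n : Int) = 0)) ↔ 0 < n := by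
    intro n; constructor <;> intro h <;> omega
  have h1 : ∀ n : Nat, ((1 : Int) ≤ (n : Int)) ↔ 0 < n := by
    intro n; constructor <;> intro h <;> omega
  have h2 : ∀ (P Q : Prop) (_ : Decidable P) (_ : Decidable Q),
      ((2 : Int) ≤ (((if P then 1 else 0) + (if Q then 1 else 0) : Nat) : Int)) ↔ (P ∧ Q) := by
    intro P Q dP dQ; split_ifs <;> simp_all
  simp only [h0, h1, h2]
  simp only [List.countP_pos_iff, beq_iff_eq, Bool.or_eq_true, exists_eq_right]
  have hex2 : ∀ (l : List String) (a b : String), (∃ x ∈ l, x = a ∨ x = b) ↔ (a ∈ l ∨ b ∈ l) := by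
    intro l a b
    constructor
    · rintro ⟨x, hx, rfl | rfl⟩
      · exact Or.inl hx
      · exact Or.inr hx
    · rintro (h | h)
      · exact ⟨a, h, Or.inl rfl⟩
      · exact ⟨b, h, Or.inr rfl⟩
  have hex4 : ∀ (l : List String) (a b c d : String),
      (∃ x ∈ l, ((x = a ∨ x = b) ∨ x = c) ∨ x = d) ↔ ((a ∈ l ∨ b ∈ l) ∨ c ∈ l) ∨ d ∈ l := by
    intro l a b c d
    constructor
    · rintro ⟨x, hx, ((rfl | rfl) | rfl) | rfl⟩
      · exact Or.inl (Or.inl (Or.inl hx))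
      · exact Or.inl (Or.inl (Or.inr hx))
      · exact Or.inl (Or.inr hx)
      · exact Or.inr hx
    · rintro (((h | h) | h) | h)
      · exact ⟨a, h, Or.inl (Or.inl (Or.inl rfl))⟩
      · exact ⟨b, h, Or.inl (Or.inl (Or.inr rfl))⟩
      · exact ⟨c, h, Or.inl (Or.inr rfl)⟩
      · exact ⟨d, h, Or.inr rfl⟩
  simp only [hex2]
  simp only [hex4]
  simp only [pv_mem_dedup, pvIn, or_assoc]
  by_cases h1 : (PySem.Dict.mk cfg).contains "survival" = true ∨ PySem.Str.lower ((PySem.Dict.mk cfg).getD "algorithm" "") = "nsgaii"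
  · simp only [if_pos h1]
  · simp only [if_neg h1]
    by_cases h2 : (PySem.Dict.mk cfg).contains "neighbor_size" = true ∨ (PySem.Dict.mk cfg).contains "aggregation" = true
    · simp only [if_pos h2]
    · simp only [if_neg h2]
      by_cases h3 : (PySem.Dict.mk cfg).contains "reference_point" = true ∧ (PySem.Dict.mk cfg).contains "selection" = true
      · simp only [if_pos h3]
      · simp only [if_neg h3]
        by_cases h4 : (PySem.Dict.mk cfg).contains "reference_directions" = true
        · simp only [if_pos h4]
        · simp only [if_neg h4]
          by_cases h5 : (PySem.Dict.mk cfg).contains "archive_size" = true ∧ (PySem.Dict.mk cfg).contains "k_neighbors" = true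
          · simp only [if_pos h5]
          · simp only [if_neg h5]
            by_cases h6 : (PySem.Dict.mk cfg).contains "indicator" = true
            · simp only [if_pos h6]
            · simp only [if_neg h6]
              by_cases h7 : (PySem.Dict.mk cfg).contains "inertia" = true ∨ (PySem.Dict.mk cfg).contains "c1" = true ∨ (PySem.Dict.mk cfg).contains "c2" = true ∨ (PySem.Dict.mk cfg).contains "vmax_fraction" = true
              · simp only [if_pos h7]
              · simp only [if_neg h7]

-- ===== VERDICT =====
theorem infer_algorithm_name_py_spec : Claim_equal_infer_algorithm_name_py := by
  intro cfg _
  unfold Spec_infer_algorithm_name_py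
  exact pv_main cfg
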